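-- pv_equiv track=rewrite | github.com/slayyyyyyy/yahtzee-expectimax | yahtzee.py | tip_roll
-- ===== SOURCE A (Python) =====
-- def tip_roll(lista_zaruri):
--     valori_zaruri = {x: lista_zaruri.count(x) for x in set(lista_zaruri)}
--     valori_unice_zaruri = sorted(set(lista_zaruri))
--     rezultat = {
--         "THREE OF A KIND": 3 in valori_zaruri.values() and len(valori_zaruri) > 2,
--         "SMALL STRAIGHT": any(
--             valori_unice_zaruri[i:i + 4] in [list(range(x, x + 4)) for x in range(1, 4)] for i in range(len(valori_unice_zaruri) - 3)
--         )
--     }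
--     return rezultat
-- ===== SOURCE B (Python) =====
-- def tip_roll(lista_zaruri):
--     unique = set(lista_zaruri)
--     return {
--         "THREE OF A KIND": len(unique) > 2 and any(lista_zaruri.count(x) == 3 for x in unique),
--         "SMALL STRAIGHT": any(p <= unique for p in ({1, 2, 3, 4}, {2, 3, 4, 5}, {3, 4, 5, 6})),
--     }
-- ===== Notes on version B (the rewrite author's own statement) =====
-- stated objective: simpler
-- what changed: Small-straight detection is rewritten from sorting the unique values and comparing every 4-wide window against generated range lists into three direct subset tests on the set of values; the count dict is replaced by a single short-circuiting any-over-set count test.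
import Mathlib
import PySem

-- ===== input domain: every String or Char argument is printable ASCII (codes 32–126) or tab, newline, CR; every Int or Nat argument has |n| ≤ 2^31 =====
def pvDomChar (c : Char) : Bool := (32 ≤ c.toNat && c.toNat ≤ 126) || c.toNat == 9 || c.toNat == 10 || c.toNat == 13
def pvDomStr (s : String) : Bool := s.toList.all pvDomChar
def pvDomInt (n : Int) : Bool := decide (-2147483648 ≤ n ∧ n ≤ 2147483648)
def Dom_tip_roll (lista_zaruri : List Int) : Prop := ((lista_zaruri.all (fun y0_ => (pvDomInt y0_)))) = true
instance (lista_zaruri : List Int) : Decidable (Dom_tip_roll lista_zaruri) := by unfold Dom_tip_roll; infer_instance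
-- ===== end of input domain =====

-- B replaces the sorted-unique sliding-window straight scan by three subset tests on the set of
-- values, and the count dict by one any-over-set test; same return value (objective: simpler).

-- ===== PORT A =====
-- Note: the Python dict comprehension iterates set(lista_zaruri) in hash order; the port iterates it
-- in first-insertion order — both results ('3 in values', 'len') are order-independent.
def tip_roll (lista_zaruri : List Int) : List (String × Bool) :=
  let valori_zaruri : PySem.Dict Int Int :=
    (PySem.Set.ofList lista_zaruri).foldl
      (fun d x => d.insert x ((PySem.List.count lista_zaruri x : Int))) PySem.Dict.empty
  let valori_unice_zaruri := PySem.List.sorted (PySem.Set.ofList lista_zaruri) (fun x => x) false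
  let pats := (PySem.List.pyRange 1 4 1).map (fun x => PySem.List.pyRange x (x + 4) 1)
  [("THREE OF A KIND", valori_zaruri.values.contains 3 && decide (valori_zaruri.size > 2)),
   ("SMALL STRAIGHT",
     (PySem.List.pyRange 0 ((valori_unice_zaruri.length : Int) - 3) 1).any
       (fun i => pats.contains (PySem.List.slice valori_unice_zaruri (some i) (some (i + 4)))))]

-- ===== PORT B =====
def tip_roll_alt (lista_zaruri : List Int) : List (String × Bool) :=
  let unique : PySem.Set Int := PySem.Set.ofList lista_zaruri
  [("THREE OF A KIND",
     decide (2 < PySem.Set.len unique) &&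
       unique.any (fun x => (PySem.List.count lista_zaruri x : Int) == 3)),
   ("SMALL STRAIGHT",
     [[(1 : Int), 2, 3, 4], [2, 3, 4, 5], [3, 4, 5, 6]].any
       (fun p => p.all (fun v => PySem.Set.contains unique v)))]

-- ===== PRECONDITION & SPEC =====
def Spec_tip_roll (lista_zaruri : List Int) (out : List (String × Bool)) : Prop := out = tip_roll_alt lista_zaruri
instance (lista_zaruri : List Int) (out : List (String × Bool)) : Decidable (Spec_tip_roll lista_zaruri out) := by unfold Spec_tip_roll; infer_instance

-- ===== CLAIM (what is proved, stated in full; the proofs are below) =====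
def Claim_equal_tip_roll : Prop := ∀ (lista_zaruri : List Int), Dom_tip_roll lista_zaruri → Spec_tip_roll lista_zaruri (tip_roll lista_zaruri)

-- ===== LEMMAS AND PROOFS =====

theorem three_eq (l : List Int) :
    (((PySem.Set.ofList l).foldl
        (fun d x => d.insert x ((PySem.List.count l x : Int))) PySem.Dict.empty).values.contains 3 &&
      decide (((PySem.Set.ofList l).foldl
        (fun d x => d.insert x ((PySem.List.count l x : Int))) PySem.Dict.empty).size > 2)) =
    (decide (2 < PySem.Set.len (PySem.Set.ofList l)) &&
      (PySem.Set.ofList l).any (fun x => (PySem.List.count l x : Int) == 3)) := by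
  have hitems := PySem.Dict.items_foldl_insert_fresh (l := PySem.Set.ofList l)
      (k := fun a => a) (v := fun a => (PySem.List.count l a : Int)) (d := PySem.Dict.empty)
      (by intro a _; simp) (by simp [PySem.Set.nodup_ofList])
  simp only [PySem.Dict.values, PySem.Dict.size, hitems]
  rw [Bool.eq_iff_iff]
  simp [PySem.Set.len, PySem.Dict.empty, List.any_eq_true, List.mem_map,
    PySem.Set.mem_ofList, and_comm]

theorem chain_head (x : Int) (t : List Int) (hp : t.Pairwise (· < ·))
    (hgt : ∀ y ∈ t, x < y) (hm : x + 1 ∈ t) :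
    ∃ t₂, t = (x + 1) :: t₂ ∧ t₂.Pairwise (· < ·) ∧ ∀ y ∈ t₂, x + 1 < y := by
  cases t with
  | nil => simp at hm
  | cons b t₂ =>
    rcases List.pairwise_cons.mp hp with ⟨hb, hpt⟩
    rcases List.mem_cons.mp hm with h | h
    · refine ⟨t₂, by rw [h], hpt, ?_⟩
      intro y hy
      have := hb y hy
      omega
    · have h1 : b < x + 1 := hb _ h
      have h2 : x < b := hgt b (List.mem_cons_self)
      omega

theorem four_infix (u : List Int) (hp : u.Pairwise (· < ·)) (x : Int)
    (h0 : x ∈ u) (h1 : x + 1 ∈ u) (h2 : x + 2 ∈ u) (h3 : x + 3 ∈ u) :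
    ∃ p s, u = p ++ [x, x + 1, x + 2, x + 3] ++ s := by
  induction u with
  | nil => simp at h0
  | cons a t ih =>
    rcases List.pairwise_cons.mp hp with ⟨ha, hpt⟩
    by_cases hax : a = x
    · subst hax
      have hm1 : a + 1 ∈ t := by
        rcases List.mem_cons.mp h1 with h | h
        · omega
        · exact h
      obtain ⟨t₂, ht, hp₂, hgt₂⟩ := chain_head a t hpt ha hm1
      have hm2 : (a + 1) + 1 ∈ t₂ := by
        have h2t : a + 2 ∈ t := by
          rcases List.mem_cons.mp h2 with h | h
          · omega
          · exact h
        rw [ht] at h2t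
        rcases List.mem_cons.mp h2t with h | h
        · omega
        · have : a + 1 + 1 = a + 2 := by omega
          rw [this]; exact h
      obtain ⟨t₃, ht₂, hp₃, hgt₃⟩ := chain_head (a + 1) t₂ hp₂ hgt₂ hm2
      have hm3 : (a + 2) + 1 ∈ t₃ := by
        have h3t : a + 3 ∈ t := by
          rcases List.mem_cons.mp h3 with h | h
          · omega
          · exact h
        rw [ht, ht₂] at h3t
        rcases List.mem_cons.mp h3t with h | h
        · omega
        rcases List.mem_cons.mp h with h' | h'
        · omega
        · have : a + 2 + 1 = a + 3 := by omega
          rw [this]; exact h'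
      have hgt₃' : ∀ y ∈ t₃, a + 2 < y := by
        intro y hy
        have : y ∈ t₂ := by rw [ht₂]; exact List.mem_cons_of_mem _ hy
        have := hgt₃ y hy
        omega
      obtain ⟨t₄, ht₃, _, _⟩ := chain_head (a + 2) t₃ hp₃ hgt₃' hm3
      refine ⟨[], t₄, ?_⟩
      have e1 : a + 1 + 1 = a + 2 := by omega
      have e2 : a + 2 + 1 = a + 3 := by omega
      simp [ht, ht₂, ht₃, e1, e2]
    · have h0t : x ∈ t := by
        rcases List.mem_cons.mp h0 with h | h
        · omega
        · exact h
      have hax' : ∀ z, z ∈ (a :: t) → x ≤ z → z ∈ t := by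
        intro z hz hxz
        rcases List.mem_cons.mp hz with h | h
        · exfalso
          have := ha x h0t
          omega
        · exact h
      obtain ⟨p, s, hps⟩ := ih hpt h0t (hax' _ h1 (by omega)) (hax' _ h2 (by omega)) (hax' _ h3 (by omega))
      exact ⟨a :: p, s, by simp [hps]⟩

theorem straight_case (u : List Int) (hp : u.Pairwise (· < ·)) (x : Int)
    (h0 : x ∈ u) (h1 : x + 1 ∈ u) (h2 : x + 2 ∈ u) (h3 : x + 3 ∈ u) :
    ∃ i ∈ PySem.List.pyRange 0 ((u.length : Int) - 3) 1,
      PySem.List.slice u (some i) (some (i + 4)) = [x, x + 1, x + 2, x + 3] := by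
  obtain ⟨p, s, hu⟩ := four_infix u hp x h0 h1 h2 h3
  refine ⟨(p.length : Int), ?_, ?_⟩
  · rw [PySem.List.mem_pyRange_one, hu]
    simp
    omega
  · have h4 : ((p.length : Int) + 4) = ((p.length : Int) + ((4 : Nat) : Int)) := by norm_num
    rw [h4, PySem.List.slice_natCast_add, hu, List.append_assoc, List.drop_left,
      List.take_left' (by simp)]

theorem pats_eval :
    (PySem.List.pyRange 1 4 1).map (fun x => PySem.List.pyRange x (x + 4) 1) =
      [[(1 : Int), 2, 3, 4], [2, 3, 4, 5], [3, 4, 5, 6]] := by decide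

theorem straight_eq (l : List Int) :
    ((PySem.List.pyRange 0 (((PySem.List.sorted (PySem.Set.ofList l) (fun x => x) false).length : Int) - 3) 1).any
       (fun i => ((PySem.List.pyRange 1 4 1).map (fun x => PySem.List.pyRange x (x + 4) 1)).contains
         (PySem.List.slice (PySem.List.sorted (PySem.Set.ofList l) (fun x => x) false) (some i) (some (i + 4))))) =
    ([[(1 : Int), 2, 3, 4], [2, 3, 4, 5], [3, 4, 5, 6]].any
       (fun p => p.all (fun v => PySem.Set.contains (PySem.Set.ofList l) v))) := by
  set u := PySem.List.sorted (PySem.Set.ofList l) (fun x => x) false with hu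
  have hp : u.Pairwise (· < ·) := hu ▸ PySem.List.sorted_ofList_pairwise_lt l
  have hmem : ∀ v : Int, v ∈ u ↔ v ∈ l := by
    intro v
    rw [hu, PySem.List.mem_sorted, PySem.Set.mem_ofList]
  rw [pats_eval, Bool.eq_iff_iff]
  simp only [List.any_eq_true, List.all_eq_true, List.contains_iff_mem,
    PySem.Set.contains_iff, PySem.Set.mem_ofList]
  constructor
  · rintro ⟨i, hi, hsl⟩
    refine ⟨_, hsl, ?_⟩
    intro v hv
    rw [← hmem]
    exact PySem.List.mem_of_mem_slice _ _ _ hv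
  · rintro ⟨p, hpmem, hall⟩
    have get : ∀ v, v ∈ p → v ∈ u := fun v hv => (hmem v).mpr (hall v hv)
    fin_cases hpmem
    · obtain ⟨i, hi, hs⟩ := straight_case u hp 1 (get 1 (by simp)) (get 2 (by simp)) (get 3 (by simp)) (get 4 (by simp))
      exact ⟨i, hi, by norm_num at hs; rw [hs]; simp⟩
    · obtain ⟨i, hi, hs⟩ := straight_case u hp 2 (get 2 (by simp)) (get 3 (by simp)) (get 4 (by simp)) (get 5 (by simp))
      exact ⟨i, hi, by norm_num at hs; rw [hs]; simp⟩
    · obtain ⟨i, hi, hs⟩ := straight_case u hp 3 (get 3 (by simp)) (get 4 (by simp)) (get 5 (by simp)) (get 6 (by simp))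
      exact ⟨i, hi, by norm_num at hs; rw [hs]; simp⟩

-- ===== VERDICT (by name: the statement is the Claim_ definition above) =====
theorem tip_roll_spec : Claim_equal_tip_roll := by
  intro l _
  show tip_roll l = tip_roll_alt l
  simp only [tip_roll, tip_roll_alt]
  rw [three_eq, straight_eq]
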